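-- pv_equiv track=rewrite | github.com/nikhil3991/Coding_qstns | Arrays/number of pairs.py | SolvethroughDP
-- ===== SOURCE A (Python) =====
-- def SolvethroughDP(n):
--
--     if n==0:
--         return 0
--     if n==1:
--         return 1
--     if n==2:
--         return 2
--     temp = [0 for i in range(n+1)]
--     temp[1]=1
--     temp[2]=2
--     for i in range(3,n+1):
--         temp[i] = temp[i-1] + (i-1)*temp[i-2]
--     return temp[n]
-- ===== SOURCE B (Python) =====
-- def SolvethroughDP(n):
--     # Closed combinatorial form: the number of involutions of n elements is
--     # sum over k (number of 2-cycles) of n! / (2^k * k! * (n-2k)!),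
--     # with each term obtained from the previous by an exact ratio update.
--     total = 0
--     t = 1
--     k = 0
--     while 2 * k <= n:
--         total += t
--         t = t * (n - 2 * k) * (n - 2 * k - 1) // (2 * (k + 1))
--         k += 1
--     return total
-- ===== Notes on version B (the rewrite author's own statement) =====
-- stated objective: alternative
-- what changed: replaces the DP array over telephone-number prefixes with the closed combinatorial sum over the number k of 2-cycles, sum_k n!/(2^k k! (n-2k)!), accumulated term by term via the exact ratio update t -> t*(n-2k)*(n-2k-1)//(2(k+1))
-- intended difference: for n == 0 A returns 0 but the number of involutions of the empty set is 1, which B returns; every standard source gives telephone number T(0)=1, so B's value is the intended one — e.g. on SolvethroughDP(0): A returns 0, B returns 1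
import Mathlib
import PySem

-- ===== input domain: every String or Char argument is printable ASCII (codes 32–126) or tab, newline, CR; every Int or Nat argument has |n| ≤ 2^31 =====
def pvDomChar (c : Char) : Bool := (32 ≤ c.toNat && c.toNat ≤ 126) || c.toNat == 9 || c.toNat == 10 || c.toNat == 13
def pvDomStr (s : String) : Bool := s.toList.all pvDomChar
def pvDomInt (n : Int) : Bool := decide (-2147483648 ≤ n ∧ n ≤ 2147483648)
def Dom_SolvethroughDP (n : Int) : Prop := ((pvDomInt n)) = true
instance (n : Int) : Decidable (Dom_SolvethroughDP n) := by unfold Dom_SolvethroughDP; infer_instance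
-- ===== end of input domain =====

-- B replaces A's DP-array recurrence by the closed combinatorial sum over the number of
-- 2-cycles (alternative algorithm, similar cost); at n = 0 B returns the intended value 1
-- where A returns 0 (stated as D_ below).


-- ===== PORT A =====
def SolvethroughDP (n : Int) : Int :=
  if n = 0 then 0
  else if n = 1 then 1
  else if n = 2 then 2
  else
    let m := n.toNat
    let temp := List.replicate (m + 1) (0 : Int)
    let temp := temp.set 1 1
    let temp := temp.set 2 2
    let temp := (List.range' 3 (m - 2)).foldl
      (fun t i => t.set i (t.getD (i - 1) 0 + ((i : Int) - 1) * t.getD (i - 2) 0)) temp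
    temp.getD m 0

-- ===== PORT B =====
-- Source B's while loop: total += t; t = t*(n-2k)*(n-2k-1) // (2*(k+1)); k += 1
def pvLoopB (n k t total : Int) : Int :=
  if 2 * k ≤ n then
    pvLoopB n (k + 1)
      (PySem.Int.floordiv (t * (n - 2 * k) * (n - 2 * k - 1)) (2 * (k + 1)))
      (total + t)
  else total
termination_by (n + 2 - 2 * k).toNat
decreasing_by
  rename_i h
  exact (Int.toNat_lt_toNat (show (0:Int) < n + 2 - 2 * k by omega)).mpr
    (show n + 2 - 2 * (k + 1) < n + 2 - 2 * k by omega)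

def SolvethroughDP_alt (n : Int) : Int := pvLoopB n 0 1 0

-- ===== PRECONDITION & SPEC =====
-- Pre_ excludes n < 0, on which A raises IndexError (temp[1] = 1 on an empty list).
def Pre_SolvethroughDP (n : Int) : Prop := 0 ≤ n
instance (n : Int) : Decidable (Pre_SolvethroughDP n) := by unfold Pre_SolvethroughDP; infer_instance
def pvWitness_SolvethroughDP : Int := 3

-- For n == 0 A returns 0, but the number of involutions (telephone number) of the empty set
-- is 1, which B returns; B's value is the intended one.
def D_SolvethroughDP (n : Int) : Prop := n = 0
instance (n : Int) : Decidable (D_SolvethroughDP n) := by unfold D_SolvethroughDP; infer_instance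

def Spec_SolvethroughDP (n : Int) (out : Int) : Prop := ¬ D_SolvethroughDP n → out = SolvethroughDP_alt n
instance (n : Int) (out : Int) : Decidable (Spec_SolvethroughDP n out) := by unfold Spec_SolvethroughDP; infer_instance

def pvDiffWitness_SolvethroughDP : Int := 0
def pvDiffWitnessOut_SolvethroughDP : Int × Int := (0, 1)

-- ===== CLAIM (what is proved, stated in full; the proofs are below) =====
def Claim_unchanged_SolvethroughDP : Prop := ∀ (n : Int), Dom_SolvethroughDP n → Pre_SolvethroughDP n → Spec_SolvethroughDP n (SolvethroughDP n)
def Claim_changed_SolvethroughDP : Prop := Dom_SolvethroughDP (pvDiffWitness_SolvethroughDP) ∧ Pre_SolvethroughDP (pvDiffWitness_SolvethroughDP) ∧ D_SolvethroughDP (pvDiffWitness_SolvethroughDP) ∧ SolvethroughDP (pvDiffWitness_SolvethroughDP) = pvDiffWitnessOut_SolvethroughDP.1 ∧ SolvethroughDP_alt (pvDiffWitness_SolvethroughDP) = pvDiffWitnessOut_SolvethroughDP.2 ∧ pvDiffWitnessOut_SolvethroughDP.1 ≠ pvDiffWitnessOut_SolvethroughDP.2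
def Claim_exact_SolvethroughDP : Prop := ∀ (n : Int), Dom_SolvethroughDP n → Pre_SolvethroughDP n → D_SolvethroughDP n → SolvethroughDP n ≠ SolvethroughDP_alt n

-- ===== LEMMAS AND PROOFS =====

-- the telephone numbers, by A's recurrence (with the textbook value 1 at 0)
def pvTN : Nat → Nat
  | 0 => 1
  | 1 => 1
  | (n + 2) => pvTN (n + 1) + (n + 1) * pvTN n

-- the odd double factorial 1*3*...*(2k-1)
def pvOdf (k : Nat) : Nat := ∏ i ∈ Finset.range k, (2 * i + 1)

-- B's combinatorial sum, in closed Nat form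
def pvS (n : Nat) : Nat := ∑ k ∈ Finset.range (n + 1), n.choose (2 * k) * pvOdf k

-- pvS may be summed over any range containing all k with 2k ≤ n (the other terms vanish)
theorem pvSext (n N : Nat) (h : n / 2 + 1 ≤ N) :
    pvS n = ∑ k ∈ Finset.range N, n.choose (2 * k) * pvOdf k := by
  unfold pvS
  rcases le_total (n + 1) N with hN | hN
  · apply Finset.sum_subset
    · intro x hx; simp only [Finset.mem_range] at *; omega
    · intro k _ hk
      simp only [Finset.mem_range, not_lt] at hk
      rw [Nat.choose_eq_zero_of_lt (by omega)]; simp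
  · symm
    apply Finset.sum_subset
    · intro x hx; simp only [Finset.mem_range] at *; omega
    · intro k _ hk
      simp only [Finset.mem_range, not_lt] at hk
      rw [Nat.choose_eq_zero_of_lt (by omega)]; simp

-- the combinatorial sum satisfies the telephone recurrence
theorem pvS_rec (n : Nat) : pvS (n + 2) = pvS (n + 1) + (n + 1) * pvS n := by
  have e2 : pvS (n+2) = ∑ k ∈ Finset.range (n+3+1), (n+2).choose (2*k) * pvOdf k :=
    pvSext _ _ (by omega)
  rw [e2, Finset.sum_range_succ' (fun k => (n+2).choose (2*k) * pvOdf k) (n+3)]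
  have hf0 : (n+2).choose (2*0) * pvOdf 0 = 1 := by simp [pvOdf]
  rw [hf0]
  have hA : ∀ k, (n+1).choose (2*k+1) * pvOdf (k+1) = (n+1) * (n.choose (2*k) * pvOdf k) := by
    intro k
    have hod : pvOdf (k+1) = pvOdf k * (2*k+1) := by
      simp [pvOdf, Finset.prod_range_succ]
    have hch : (n+1) * n.choose (2*k) = (n+1).choose (2*k+1) * (2*k+1) := by
      simpa using Nat.add_one_mul_choose_eq n (2*k)
    rw [hod]
    calc (n+1).choose (2*k+1) * (pvOdf k * (2*k+1))
        = ((n+1).choose (2*k+1) * (2*k+1)) * pvOdf k := by ring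
      _ = ((n+1) * n.choose (2*k)) * pvOdf k := by rw [hch]
      _ = (n+1) * (n.choose (2*k) * pvOdf k) := by ring
  have hterm : ∀ k ∈ Finset.range (n+3),
      (n+2).choose (2*(k+1)) * pvOdf (k+1)
        = (n+1) * (n.choose (2*k) * pvOdf k) + (n+1).choose (2*(k+1)) * pvOdf (k+1) := by
    intro k _
    have hsplit : (n+2).choose (2*(k+1)) = (n+1).choose (2*k+1) + (n+1).choose (2*(k+1)) := by
      have h1 : 2*(k+1) = (2*k+1)+1 := by ring
      rw [h1, Nat.choose_succ_succ]
    rw [hsplit, add_mul, hA k]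
  rw [Finset.sum_congr rfl hterm, Finset.sum_add_distrib]
  have h1 : ∑ k ∈ Finset.range (n+3), (n+1) * (n.choose (2*k) * pvOdf k) = (n+1) * pvS n := by
    rw [← Finset.mul_sum, ← pvSext n (n+3) (by omega)]
  have h2 : pvS (n+1) = (∑ k ∈ Finset.range (n+3), (n+1).choose (2*(k+1)) * pvOdf (k+1)) + 1 := by
    rw [pvSext (n+1) (n+3+1) (by omega),
        Finset.sum_range_succ' (fun k => (n+1).choose (2*k) * pvOdf k) (n+3)]
    simp [pvOdf]
  omega

theorem pvS_eq_TN (n : Nat) : pvS n = pvTN n := by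
  induction n using Nat.twoStepInduction with
  | zero => decide
  | one => decide
  | more n ih1 ih2 => rw [pvS_rec, ih2, ih1]; rfl

-- one term of B's sum
def pvT (m j : Nat) : Int := ((m.choose (2 * j) * pvOdf j : Nat) : Int)

theorem pvNatId (m k : Nat) :
    m.choose (2 * k) * pvOdf k * (m - 2 * k) * (m - 2 * k - 1)
      = m.choose (2 * (k + 1)) * pvOdf (k + 1) * (2 * (k + 1)) := by
  have h1 : m.choose (2 * k + 1) * (2 * k + 1) = m.choose (2 * k) * (m - 2 * k) :=
    Nat.choose_succ_right_eq m (2 * k)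
  have h2 : m.choose (2 * k + 2) * (2 * k + 2) = m.choose (2 * k + 1) * (m - (2 * k + 1)) :=
    Nat.choose_succ_right_eq m (2 * k + 1)
  have hod : pvOdf (k + 1) = pvOdf k * (2 * k + 1) := by
    simp [pvOdf, Finset.prod_range_succ]
  have e1 : 2 * (k + 1) = 2 * k + 2 := by ring
  have e2 : m - (2 * k + 1) = m - 2 * k - 1 := by omega
  rw [e1, hod]
  calc m.choose (2*k) * pvOdf k * (m - 2*k) * (m - 2*k - 1)
      = (m.choose (2*k) * (m - 2*k)) * (m - 2*k - 1) * pvOdf k := by ring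
    _ = (m.choose (2*k+1) * (2*k+1)) * (m - 2*k - 1) * pvOdf k := by rw [h1]
    _ = (m.choose (2*k+1) * (m - (2*k+1))) * (2*k+1) * pvOdf k := by rw [e2]; ring
    _ = (m.choose (2*k+2) * (2*k+2)) * (2*k+1) * pvOdf k := by rw [h2]
    _ = m.choose (2*k+2) * (pvOdf k * (2*k+1)) * (2*k+2) := by ring

-- the ratio update of Source B maps one term to the next (exact division)
theorem pvStep (m k : Nat) (hk : 2 * k ≤ m) :
    PySem.Int.floordiv (pvT m k * ((m : Int) - 2 * k) * ((m : Int) - 2 * k - 1))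
      (2 * ((k : Int) + 1)) = pvT m (k + 1) := by
  rcases eq_or_lt_of_le hk with he | hlt
  · have hz : (m : Int) - 2 * k = 0 := by omega
    rw [hz, mul_zero, zero_mul,
        PySem.Int.floordiv_eq_ediv_of_pos (by positivity), Int.zero_ediv]
    unfold pvT
    rw [Nat.choose_eq_zero_of_lt (by omega)]
    simp
  · have e1 : (m : Int) - 2 * k = ((m - 2 * k : Nat) : Int) := by omega
    have e2 : (m : Int) - 2 * k - 1 = ((m - 2 * k - 1 : Nat) : Int) := by omega
    have e3 : (2 : Int) * ((k : Int) + 1) = ((2 * (k + 1) : Nat) : Int) := by push_cast; ring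
    have e4 : pvT m k * ((m - 2 * k : Nat) : Int) * ((m - 2 * k - 1 : Nat) : Int)
        = ((m.choose (2 * (k + 1)) * pvOdf (k + 1) * (2 * (k + 1)) : Nat) : Int) := by
      unfold pvT
      rw [← pvNatId]
      push_cast
      ring
    rw [e2, e1, e3, e4, PySem.Int.floordiv_natCast, Nat.mul_div_cancel _ (by positivity)]
    rfl

-- unrolling Source B's loop: from counter k with the k-th term in hand it adds terms k..m/2
theorem pvLoop_eq (m : Nat) : ∀ c k total, k + c = m / 2 + 1 →
    pvLoopB (m : Int) (k : Int) (pvT m k) total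
      = total + ∑ j ∈ Finset.Ico k (m / 2 + 1), pvT m j := by
  intro c
  induction c with
  | zero =>
    intro k total hk
    rw [pvLoopB.eq_def, if_neg (by omega)]
    rw [Finset.Ico_eq_empty (by omega)]
    simp
  | succ c ih =>
    intro k total hk
    have hkm : 2 * k ≤ m := by omega
    rw [pvLoopB.eq_def, if_pos (by omega)]
    have ek : (k : Int) + 1 = ((k + 1 : Nat) : Int) := by push_cast; ring
    rw [pvStep m k hkm, ek, ih (k + 1) (total + pvT m k) (by omega)]
    rw [Finset.sum_eq_sum_Ico_succ_bot (by omega : k < m / 2 + 1)]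
    ring

theorem pvAlt_eq (n : Int) (h : 0 ≤ n) : SolvethroughDP_alt n = (pvS n.toNat : Int) := by
  obtain ⟨m, rfl⟩ := Int.eq_ofNat_of_zero_le h
  unfold SolvethroughDP_alt
  have h0 : pvT m 0 = 1 := by simp [pvT, pvOdf]
  have hl := pvLoop_eq m (m / 2 + 1) 0 0 (by omega)
  rw [h0] at hl
  simp only [Nat.cast_zero] at hl
  rw [hl, zero_add, ← Finset.range_eq_Ico, Int.toNat_natCast]
  unfold pvT
  rw [← Nat.cast_sum]
  exact_mod_cast congrArg (Nat.cast : Nat → Int) (pvSext m (m/2+1) le_rfl).symm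

theorem pvGetD_set_ne (l : List Int) (a idx : Nat) (v : Int) (h : a ≠ idx) :
    (l.set a v).getD idx 0 = l.getD idx 0 := by
  simp [List.getD_eq_getElem?_getD, List.getElem?_set_ne h]

-- loop invariant of A's DP: after j iterations the array holds pvTN at indices 1..j+2
theorem pvInv (m : Nat) (hm : 3 ≤ m) : ∀ j, j ≤ m - 2 →
    (((List.range' 3 j).foldl
        (fun t i => t.set i (t.getD (i - 1) 0 + ((i : Int) - 1) * t.getD (i - 2) 0))
        (((List.replicate (m + 1) (0 : Int)).set 1 1).set 2 2)).length = m + 1)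
    ∧ ∀ idx, 1 ≤ idx → idx ≤ j + 2 →
      ((List.range' 3 j).foldl
        (fun t i => t.set i (t.getD (i - 1) 0 + ((i : Int) - 1) * t.getD (i - 2) 0))
        (((List.replicate (m + 1) (0 : Int)).set 1 1).set 2 2)).getD idx 0 = (pvTN idx : Int) := by
  intro j
  induction j with
  | zero =>
    intro _
    rw [List.range'_zero]
    constructor
    · simp
    · intro idx h1 h2
      simp only [List.foldl_nil]
      interval_cases idx
      · rw [pvGetD_set_ne _ _ _ _ (by omega),
            List.getD_eq_getElem?_getD, List.getElem?_set_self (by simp; omega)]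
        rfl
      · rw [List.getD_eq_getElem?_getD, List.getElem?_set_self (by simp; omega)]
        rfl
  | succ j ih =>
    intro hj
    obtain ⟨ihl, ihv⟩ := ih (by omega)
    rw [List.range'_concat, List.foldl_append]
    simp only [one_mul, List.foldl_cons, List.foldl_nil]
    constructor
    · rw [List.length_set, ihl]
    · intro idx h1 h2
      by_cases hcase : idx = 3 + j
      · subst hcase
        rw [List.getD_eq_getElem?_getD, List.getElem?_set_self (by rw [ihl]; omega)]
        have e1 : 3 + j - 1 = j + 2 := by omega
        have e2 : 3 + j - 2 = j + 1 := by omega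
        rw [e1, e2, ihv (j+2) (by omega) (by omega), ihv (j+1) (by omega) (by omega)]
        have h3 : pvTN (3 + j) = pvTN (j + 2) + (j + 2) * pvTN (j + 1) := by
          have he : 3 + j = (j + 1) + 2 := by omega
          rw [he]; rfl
        simp only [Option.getD_some, h3]
        push_cast
        ring
      · rw [pvGetD_set_ne _ _ _ _ (by omega)]
        exact ihv idx h1 (by omega)

theorem pvA_eq (n : Int) (h : 3 ≤ n) : SolvethroughDP n = (pvTN n.toNat : Int) := by
  unfold SolvethroughDP
  rw [if_neg (by omega), if_neg (by omega), if_neg (by omega)]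
  obtain ⟨_, hv⟩ := pvInv n.toNat (by omega) (n.toNat - 2) le_rfl
  exact hv n.toNat (by omega) (by omega)

-- ===== VERDICT (by name: the statement is the Claim_ definition above) =====
theorem SolvethroughDP_spec : Claim_unchanged_SolvethroughDP := by
  intro n _ hpre hd
  unfold Pre_SolvethroughDP at hpre
  unfold D_SolvethroughDP at hd
  rw [pvAlt_eq n hpre, pvS_eq_TN]
  rcases (by omega : n = 1 ∨ n = 2 ∨ 3 ≤ n) with h | h | h
  · subst h; decide
  · subst h; decide
  · exact pvA_eq n h

theorem SolvethroughDP_changed : Claim_changed_SolvethroughDP := by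
  unfold Claim_changed_SolvethroughDP
  have hB : SolvethroughDP_alt pvDiffWitness_SolvethroughDP = pvDiffWitnessOut_SolvethroughDP.2 := by
    unfold pvDiffWitness_SolvethroughDP pvDiffWitnessOut_SolvethroughDP
    rw [pvAlt_eq 0 le_rfl]; decide
  exact ⟨by decide, by decide, by decide, by decide, hB, by decide⟩

theorem SolvethroughDP_tight : Claim_exact_SolvethroughDP := by
  intro n _ _ hd
  unfold D_SolvethroughDP at hd; subst hd
  rw [pvAlt_eq 0 le_rfl]; decide
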